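-- pv_equiv track=rewrite | github.com/ELiTE0005/CuSignal---GPU-Acc-Signal-Denoising-Sys | backend.py | _class_from_path
-- ===== SOURCE A (Python) =====
-- def _class_from_path(path: str) -> str:
--     parts = path.replace("\\", "/").split("/")
--     for i, part in enumerate(parts):
--         if part in ("train", "test") and i + 1 < len(parts):
--             return parts[i + 1]
--         if part == "Padded_imgs" and i + 1 < len(parts):
--             return parts[i + 1]
--     return "UNKNOWN"
-- ===== SOURCE B (Python) =====
-- def _class_from_path(path: str) -> str:
--     parts = path.replace("\\", "/").split("/")
--     hits = [parts.index(m) for m in ("train", "test", "Padded_imgs") if m in parts]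
--     if not hits:
--         return "UNKNOWN"
--     j = min(hits) + 1
--     return parts[j] if j < len(parts) else "UNKNOWN"
-- ===== Notes on version B (the rewrite author's own statement) =====
-- stated objective: alternative
-- what changed: Inverts the traversal: instead of A's positional scan over the path components with successor bounds checks, B iterates over the three markers, collects each present marker's first index with list.index, takes the minimum, and returns the component after it (staged passes + arithmetic min instead of a single enumerate loop).
import Mathlib
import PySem

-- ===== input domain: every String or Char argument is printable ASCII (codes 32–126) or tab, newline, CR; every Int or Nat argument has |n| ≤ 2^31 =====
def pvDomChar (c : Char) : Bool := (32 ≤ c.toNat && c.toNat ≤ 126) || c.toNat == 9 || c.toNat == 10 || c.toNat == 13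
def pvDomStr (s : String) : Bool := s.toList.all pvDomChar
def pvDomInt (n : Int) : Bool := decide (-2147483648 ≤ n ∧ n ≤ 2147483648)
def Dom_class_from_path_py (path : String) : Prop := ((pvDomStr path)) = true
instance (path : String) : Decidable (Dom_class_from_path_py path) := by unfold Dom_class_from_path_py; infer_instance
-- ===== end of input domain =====

-- B inverts the traversal: instead of A's positional scan over the components, it iterates over
-- the three MARKERS, collects the first index of each present marker, takes the minimum, and
-- returns the component after it (alternative decomposition, same cost).

-- ===== PORT A =====
-- path.replace("\\", "/").split("/")  ("/" is nonempty, so split? always returns some)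
def pvPartsA (path : String) : List String :=
  (PySem.Str.split? (PySem.Str.replace path "\\" "/") "/").getD []

-- the 'for i, part in enumerate(parts)' loop: i is the current index, the third argument the remaining parts
def pvGoA (parts : List String) (i : Nat) : List String → String
  | [] => "UNKNOWN"
  | part :: rest =>
    if (part = "train" ∨ part = "test") ∧ i + 1 < parts.length then
      (PySem.List.pyGet? parts ((i : Int) + 1)).getD "UNKNOWN"
    else if part = "Padded_imgs" ∧ i + 1 < parts.length then
      (PySem.List.pyGet? parts ((i : Int) + 1)).getD "UNKNOWN"
    else pvGoA parts (i + 1) rest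

def class_from_path_py (path : String) : String :=
  pvGoA (pvPartsA path) 0 (pvPartsA path)

-- ===== PORT B =====
def pvPartsB (path : String) : List String :=
  (PySem.Str.split? (PySem.Str.replace path "\\" "/") "/").getD []

def pvMarkers : List String := ["train", "test", "Padded_imgs"]

-- hits = [parts.index(m) for m in markers if m in parts]: 'm in parts' guard + .index(m)
-- is exactly PySem.List.index? (some iff member), so the comprehension is a filterMap.
def pvHits (parts : List String) : List Nat :=
  pvMarkers.filterMap (fun m => PySem.List.index? parts m)

def class_from_path_py_alt (path : String) : String :=
  let parts := pvPartsB path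
  match PySem.List.min? (pvHits parts) (fun x => x) with
  | none => "UNKNOWN"                -- 'if not hits: return "UNKNOWN"'
  | some k =>
    let j := k + 1
    if j < parts.length then (PySem.List.pyGet? parts (j : Int)).getD "UNKNOWN"
    else "UNKNOWN"

-- ===== PRECONDITION & SPEC =====
def Spec_class_from_path_py (path : String) (out : String) : Prop := out = class_from_path_py_alt path
instance (path : String) (out : String) : Decidable (Spec_class_from_path_py path out) := by unfold Spec_class_from_path_py; infer_instance

-- ===== CLAIM (what is proved, stated in full; the proofs are below) =====
def Claim_equal_class_from_path_py : Prop := ∀ (path : String), Dom_class_from_path_py path → Spec_class_from_path_py path (class_from_path_py path)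

-- ===== LEMMAS AND PROOFS =====

-- the common characterisation: position of the first marker component
def pvFirst (parts : List String) : Option Nat :=
  parts.findIdx? (fun p => decide (p ∈ pvMarkers))

lemma pvGoA_eq_first (suf : List String) : ∀ (parts : List String) (i : Nat),
    parts.drop i = suf →
    pvGoA parts i suf =
      (match pvFirst suf with
       | none => "UNKNOWN"
       | some k => (PySem.List.pyGet? parts (((i + k + 1 : Nat) : Int))).getD "UNKNOWN") := by
  induction suf with
  | nil => intro parts i h; simp [pvGoA, pvFirst]
  | cons part rest ih =>
    intro parts i h
    have hlen : parts.length - i = rest.length + 1 := by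
      have := congrArg List.length h; simp at this; omega
    have htail : parts.drop (i + 1) = rest := by
      rw [← List.tail_drop, h, List.tail_cons]
    by_cases hm : part ∈ pvMarkers
    · have hfi : pvFirst (part :: rest) = some 0 := by
        simp [pvFirst, List.findIdx?_cons, hm]
      rw [hfi]
      have hm' : (part = "train" ∨ part = "test") ∨ part = "Padded_imgs" := by
        simpa [pvMarkers, or_assoc] using hm
      by_cases hlt : i + 1 < parts.length
      · have hi1 : ((i : Int) + 1) = ((i + 0 + 1 : Nat) : Int) := by push_cast; ring
        rcases hm' with h12 | h3
        · simp only [pvGoA, if_pos (And.intro h12 hlt), hi1]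
        · have c1 : ¬ ((part = "train" ∨ part = "test") ∧ i + 1 < parts.length) := by
            rintro ⟨hc, -⟩; rw [h3] at hc
            rcases hc with hc | hc <;> exact absurd hc (by decide)
          simp only [pvGoA, if_neg c1, if_pos (And.intro h3 hlt), hi1]
      · -- marker is the last component: no successor, A falls through to []="UNKNOWN"
        have hrest : rest = [] := by
          have : rest.length = 0 := by omega
          exact List.eq_nil_of_length_eq_zero this
        have hget : PySem.List.pyGet? parts (((i + 0 + 1 : Nat) : Int)) = none := by
          rw [PySem.List.pyGet?_natCast]
          exact List.getElem?_eq_none (by omega)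
        have c1 : ¬ ((part = "train" ∨ part = "test") ∧ i + 1 < parts.length) :=
          fun hc => hlt hc.2
        have c3 : ¬ (part = "Padded_imgs" ∧ i + 1 < parts.length) :=
          fun hc => hlt hc.2
        simp only [pvGoA, if_neg c1, if_neg c3, hrest, hget, Option.getD_none]
    · have hfi : pvFirst (part :: rest) = (pvFirst rest).map (· + 1) := by
        simp [pvFirst, List.findIdx?_cons, hm]
      have c1 : ¬ ((part = "train" ∨ part = "test") ∧ i + 1 < parts.length) := by
        rintro ⟨hc, -⟩
        exact hm (by rcases hc with hc | hc <;> simp [pvMarkers, hc])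
      have c3 : ¬ (part = "Padded_imgs" ∧ i + 1 < parts.length) := by
        rintro ⟨hc, -⟩; exact hm (by simp [pvMarkers, hc])
      have hstep : pvGoA parts i (part :: rest) = pvGoA parts (i + 1) rest := by
        simp only [pvGoA, if_neg c1, if_neg c3]
      rw [hstep, ih parts (i + 1) htail, hfi]
      cases pvFirst rest with
      | none => rfl
      | some k =>
        simp only [Option.map_some]
        have : i + 1 + k + 1 = i + (k + 1) + 1 := by omega
        rw [this]

-- min over a list shifted by one
lemma foldl_min_map_succ (t : List Nat) : ∀ x : Nat,
    (t.map (· + 1)).foldl min (x + 1) = t.foldl min x + 1 := by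
  induction t with
  | nil => intro x; rfl
  | cons h tl ih =>
    intro x
    simp only [List.map_cons, List.foldl_cons]
    rw [show min (x + 1) (h + 1) = min x h + 1 by omega]
    exact ih (min x h)

lemma min?_map_succ (xs : List Nat) :
    PySem.List.min? (xs.map (· + 1)) (fun x => x) =
      (PySem.List.min? xs (fun x => x)).map (· + 1) := by
  cases xs with
  | nil => rfl
  | cons x t =>
    simp only [List.map_cons, PySem.List.min?_id_cons, Option.map_some]
    rw [foldl_min_map_succ]

-- B's min-of-first-indices equals the index of the first marker component
lemma min_hits_eq_first (L : List String) : ∀ (parts : List String),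
    PySem.List.min? (L.filterMap (fun m => PySem.List.index? parts m)) (fun x => x) =
      parts.findIdx? (fun p => decide (p ∈ L)) := by
  intro parts
  induction parts with
  | nil => simp
  | cons a rest ih =>
    by_cases ha : a ∈ L
    · rw [List.findIdx?_cons]
      simp only [ha, decide_true, if_pos]
      -- 0 is in the hits (from marker a) and everything is a Nat, so the min is 0
      have h0 : (0 : Nat) ∈ L.filterMap (fun m => PySem.List.index? (a :: rest) m) := by
        apply List.mem_filterMap.mpr
        exact ⟨a, ha, PySem.List.index?_cons_self a rest⟩
      cases hmin : PySem.List.min? (L.filterMap (fun m => PySem.List.index? (a :: rest) m))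
          (fun x => x) with
      | none =>
        rw [PySem.List.min?_eq_none_iff] at hmin
        rw [hmin] at h0; exact absurd h0 (List.not_mem_nil)
      | some m =>
        have hle := PySem.List.min?_isMin hmin 0 h0
        simp only at hle
        have : m = 0 := by omega
        rw [this]
    · rw [List.findIdx?_cons]
      simp only [ha, decide_false, if_neg, Bool.false_eq_true, not_false_iff]
      have hmap : L.filterMap (fun m => PySem.List.index? (a :: rest) m) =
          (L.filterMap (fun m => PySem.List.index? rest m)).map (· + 1) := by
        rw [List.map_filterMap]
        apply List.filterMap_congr
        intro m hmL
        have hne : a ≠ m := fun h => ha (h ▸ hmL)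
        rw [PySem.List.index?_cons_of_ne rest hne]
      rw [hmap, min?_map_succ, ih]

lemma alt_char (path : String) :
    class_from_path_py_alt path =
      (match pvFirst (pvPartsB path) with
       | none => "UNKNOWN"
       | some k =>
         if k + 1 < (pvPartsB path).length then
           (PySem.List.pyGet? (pvPartsB path) (((k + 1 : Nat)) : Int)).getD "UNKNOWN"
         else "UNKNOWN") := by
  simp only [class_from_path_py_alt, pvHits]
  rw [show PySem.List.min? (pvMarkers.filterMap (fun m => PySem.List.index? (pvPartsB path) m))
        (fun x => x) = pvFirst (pvPartsB path) from
    min_hits_eq_first pvMarkers (pvPartsB path)]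

lemma first_if (parts : List String) :
    pvGoA parts 0 parts =
      (match pvFirst parts with
       | none => "UNKNOWN"
       | some k =>
         if k + 1 < parts.length then
           (PySem.List.pyGet? parts (((k + 1 : Nat)) : Int)).getD "UNKNOWN"
         else "UNKNOWN") := by
  rw [pvGoA_eq_first parts parts 0 (by simp)]
  cases hfi : pvFirst parts with
  | none => rfl
  | some k =>
    simp only
    by_cases hlt : k + 1 < parts.length
    · rw [if_pos hlt]
      norm_num
    · rw [if_neg hlt]
      have : PySem.List.pyGet? parts (((0 + k + 1 : Nat) : Int)) = none := by
        rw [PySem.List.pyGet?_natCast]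
        exact List.getElem?_eq_none (by omega)
      rw [this]; rfl

-- ===== VERDICT (by name: the statement is the Claim_ definition above) =====
theorem class_from_path_py_spec : Claim_equal_class_from_path_py := by
  intro path _
  unfold Spec_class_from_path_py class_from_path_py
  rw [alt_char]
  have hparts : pvPartsB path = pvPartsA path := rfl
  rw [hparts]
  exact first_if (pvPartsA path)
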